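-- pv_equiv track=rewrite | github.com/PLSE-Lab/Python-MLAPI-expl | python_sources/simple-nlp.py | which_name_first
-- ===== SOURCE A (Python) =====
-- def which_name_first(sentence, name1, name2): #If name1 is first, return True
--     name1_check = 0
--     for word_punct in sentence.split():
--         for word_comma in word_punct.split(";"):
--             for word in word_comma.split(","):
--                 if word == name2 and name1_check == 0:
--                     return False
--                 if word == name1:
--                     name1_check = 1
--     return True
-- ===== SOURCE B (Python) =====
-- def which_name_first(sentence, name1, name2):
--     tokens = [w for part in sentence.split()
--                 for seg in part.split(";")
--                 for w in seg.split(",")]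
--     try:
--         i1 = tokens.index(name1)
--     except ValueError:
--         i1 = None
--     try:
--         i2 = tokens.index(name2)
--     except ValueError:
--         i2 = None
--     if i2 is None:
--         return True
--     return i1 is not None and i1 < i2
-- ===== Notes on version B (the rewrite author's own statement) =====
-- stated objective: simpler
-- what changed: Replaces the stateful triple-nested loop with an early return by flattening all tokens once and comparing the first indices of the two names.
import Mathlib
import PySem

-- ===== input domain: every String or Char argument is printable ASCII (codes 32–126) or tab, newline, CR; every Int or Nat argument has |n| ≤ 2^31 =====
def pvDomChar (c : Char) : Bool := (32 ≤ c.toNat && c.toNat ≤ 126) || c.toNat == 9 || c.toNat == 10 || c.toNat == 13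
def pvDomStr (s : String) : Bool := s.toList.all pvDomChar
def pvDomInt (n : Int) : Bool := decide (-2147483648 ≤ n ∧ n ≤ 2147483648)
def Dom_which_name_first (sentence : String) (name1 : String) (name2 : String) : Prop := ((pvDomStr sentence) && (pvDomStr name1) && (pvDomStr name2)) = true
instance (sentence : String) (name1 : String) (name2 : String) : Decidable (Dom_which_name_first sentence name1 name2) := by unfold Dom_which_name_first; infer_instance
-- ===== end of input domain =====

-- B flattens the tokens once and compares the first indices of the two names,
-- replacing A's stateful nested loops with early return; objective: simpler.

-- ===== PORT A =====
-- s.split(sep) for the NON-EMPTY literal separators ";" and "," (split? is none only for sep = "")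
def pvSplitOn (s : String) (sep : String) : List String := (PySem.Str.split? s sep).getD []

-- innermost loop: 'for word in word_comma.split(",")'; some check' = continue, none = 'return False'
def pvLoopWords (name1 name2 : String) (check : Int) : List String → Option Int
  | [] => some check
  | w :: ws =>
      if w = name2 ∧ check = 0 then none
      else if w = name1 then pvLoopWords name1 name2 1 ws
      else pvLoopWords name1 name2 check ws

-- middle loop: 'for word_comma in word_punct.split(";")'
def pvLoopSemi (name1 name2 : String) (check : Int) : List String → Option Int
  | [] => some check
  | wc :: rest =>
      match pvLoopWords name1 name2 check (pvSplitOn wc ",") with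
      | none => none
      | some c => pvLoopSemi name1 name2 c rest

-- outer loop: 'for word_punct in sentence.split()'
def pvLoopOuter (name1 name2 : String) (check : Int) : List String → Option Int
  | [] => some check
  | wp :: rest =>
      match pvLoopSemi name1 name2 check (pvSplitOn wp ";") with
      | none => none
      | some c => pvLoopOuter name1 name2 c rest

def which_name_first (sentence : String) (name1 : String) (name2 : String) : Bool :=
  match pvLoopOuter name1 name2 0 (PySem.Str.split₀ sentence) with
  | none => false        -- 'return False'
  | some _ => true       -- 'return True'

-- ===== PORT B =====
def which_name_first_alt (sentence : String) (name1 : String) (name2 : String) : Bool :=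
  let tokens := (PySem.Str.split₀ sentence).flatMap (fun part =>
    (pvSplitOn part ";").flatMap (fun seg => pvSplitOn seg ","))
  let i1 := PySem.List.index? tokens name1
  let i2 := PySem.List.index? tokens name2
  match i2 with
  | none => true
  | some j =>
      match i1 with
      | none => false
      | some i => decide (i < j)

-- ===== PRECONDITION & SPEC =====
def Spec_which_name_first (sentence : String) (name1 : String) (name2 : String) (out : Bool) : Prop := out = which_name_first_alt sentence name1 name2
instance (sentence : String) (name1 : String) (name2 : String) (out : Bool) : Decidable (Spec_which_name_first sentence name1 name2 out) := by unfold Spec_which_name_first; infer_instance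

-- ===== CLAIM (what is proved, stated in full; the proofs are below) =====
def Claim_equal_which_name_first : Prop := ∀ (sentence : String) (name1 : String) (name2 : String), Dom_which_name_first sentence name1 name2 → Spec_which_name_first sentence name1 name2 (which_name_first sentence name1 name2)

-- ===== LEMMAS AND PROOFS =====

-- the innermost loop over an appended list threads its state
theorem pvLoopWords_append (n1 n2 : String) (c : Int) (xs ys : List String) :
    pvLoopWords n1 n2 c (xs ++ ys)
      = (pvLoopWords n1 n2 c xs).bind (fun c' => pvLoopWords n1 n2 c' ys) := by
  induction xs generalizing c with
  | nil => simp [pvLoopWords]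
  | cons w ws ih =>
      by_cases h : w = n2 ∧ c = 0
      · simp [pvLoopWords, h]
      · by_cases h1 : w = n1
        · subst h1; simp [pvLoopWords, h, ih]
        · simp [pvLoopWords, h, h1, ih]

-- the middle loop is the innermost loop over the comma-flattened pieces
theorem pvLoopSemi_eq (n1 n2 : String) (c : Int) (ps : List String) :
    pvLoopSemi n1 n2 c ps
      = pvLoopWords n1 n2 c (ps.flatMap (fun wc => pvSplitOn wc ",")) := by
  induction ps generalizing c with
  | nil => simp [pvLoopSemi, pvLoopWords]
  | cons wc rest ih =>
      simp only [pvLoopSemi, List.flatMap_cons, pvLoopWords_append]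
      cases pvLoopWords n1 n2 c (pvSplitOn wc ",") with
      | none => rfl
      | some c' => simpa using ih c'

-- the outer loop is the innermost loop over the fully flattened token list
theorem pvLoopOuter_eq (n1 n2 : String) (c : Int) (ps : List String) :
    pvLoopOuter n1 n2 c ps
      = pvLoopWords n1 n2 c (ps.flatMap (fun wp =>
          (pvSplitOn wp ";").flatMap (fun wc => pvSplitOn wc ","))) := by
  induction ps generalizing c with
  | nil => simp [pvLoopOuter, pvLoopWords]
  | cons wp rest ih =>
      simp only [pvLoopOuter, List.flatMap_cons, pvLoopWords_append, pvLoopSemi_eq]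
      cases pvLoopWords n1 n2 c ((pvSplitOn wp ";").flatMap (fun wc => pvSplitOn wc ",")) with
      | none => rfl
      | some c' => simpa using ih c'

-- once the flag is set the loop can no longer return False
theorem pvLoopWords_one (n1 n2 : String) (ts : List String) :
    pvLoopWords n1 n2 1 ts = some 1 := by
  induction ts with
  | nil => rfl
  | cons w ws ih => by_cases h1 : w = n1 <;> simp [pvLoopWords, h1, ih]

-- the flag loop decides exactly the first-index comparison
theorem pvLoop_eq_index (n1 n2 : String) (toks : List String) :
    (match pvLoopWords n1 n2 0 toks with | none => false | some _ => true)
      = (match PySem.List.index? toks n2 with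
         | none => true
         | some j => match PySem.List.index? toks n1 with
            | none => false
            | some i => decide (i < j)) := by
  induction toks with
  | nil => simp [pvLoopWords, PySem.List.index?]
  | cons w ws ih =>
      by_cases h2 : w = n2
      · subst h2
        rw [PySem.List.index?_cons_self]
        by_cases h1 : w = n1
        · subst h1
          rw [PySem.List.index?_cons_self]
          simp [pvLoopWords]
        · rw [PySem.List.index?_cons_of_ne ws h1]
          cases PySem.List.index? ws n1 <;> simp [pvLoopWords]
      · by_cases h1 : w = n1
        · subst h1
          rw [PySem.List.index?_cons_self, PySem.List.index?_cons_of_ne ws h2]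
          cases PySem.List.index? ws n2 <;> simp [pvLoopWords, h2, pvLoopWords_one]
        · rw [PySem.List.index?_cons_of_ne ws h2, PySem.List.index?_cons_of_ne ws h1]
          have hL : pvLoopWords n1 n2 0 (w :: ws) = pvLoopWords n1 n2 0 ws := by
            simp [pvLoopWords, h1, h2]
          rw [hL, ih]
          cases PySem.List.index? ws n2 <;> cases PySem.List.index? ws n1 <;> simp

-- ===== VERDICT (by name: the statement is the Claim_ definition above) =====
theorem which_name_first_spec : Claim_equal_which_name_first := by
  intro sentence name1 name2 _
  unfold Spec_which_name_first which_name_first which_name_first_alt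
  rw [pvLoopOuter_eq]
  exact pvLoop_eq_index name1 name2 _
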